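-- pv_equiv track=rewrite | github.com/LrsNate/M2LI-AnaSynt | 05_pcfg/extract_rules.py | extract_root_and_children
-- ===== SOURCE A (Python) =====
-- def extract_root_and_children(buf):
--     brackets_balance = 0
--     seq = []
--     segm_in_process = ''
--
--     for char in buf:
--         if char == '(':
--             brackets_balance += 1
--         elif char == ')':
--             brackets_balance -= 1
--         if brackets_balance == 0 and char == ' ':
--             seq.append(segm_in_process)
--             segm_in_process = ''
--         else:
--             segm_in_process += char
--
--     if brackets_balance == -1:
--         seq.append(segm_in_process[:-1])
--     else:
--         seq.append(segm_in_process)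
--     return seq[0], seq[1:]
-- ===== SOURCE B (Python) =====
-- def extract_root_and_children(buf):
--     # One pass records the indices of top-level spaces; tokens are then read
--     # off by slicing buf between consecutive boundaries.
--     cuts = []
--     bal = 0
--     for i, c in enumerate(buf):
--         if c == '(':
--             bal += 1
--         elif c == ')':
--             bal -= 1
--         if bal == 0 and c == ' ':
--             cuts.append(i)
--     bounds = [-1] + cuts + [len(buf)]
--     toks = [buf[bounds[j] + 1:bounds[j + 1]] for j in range(len(bounds) - 1)]
--     if bal == -1:
--         toks[-1] = toks[-1][:-1]
--     return toks[0], toks[1:]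
-- ===== Notes on version B (the rewrite author's own statement) =====
-- stated objective: alternative
-- what changed: B records the indices of top-level delimiter spaces in one balance-tracking pass and then materialises the tokens by slicing buf between consecutive boundary indices, instead of A's character-by-character accumulation of a current segment into a growing list.
import Mathlib
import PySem

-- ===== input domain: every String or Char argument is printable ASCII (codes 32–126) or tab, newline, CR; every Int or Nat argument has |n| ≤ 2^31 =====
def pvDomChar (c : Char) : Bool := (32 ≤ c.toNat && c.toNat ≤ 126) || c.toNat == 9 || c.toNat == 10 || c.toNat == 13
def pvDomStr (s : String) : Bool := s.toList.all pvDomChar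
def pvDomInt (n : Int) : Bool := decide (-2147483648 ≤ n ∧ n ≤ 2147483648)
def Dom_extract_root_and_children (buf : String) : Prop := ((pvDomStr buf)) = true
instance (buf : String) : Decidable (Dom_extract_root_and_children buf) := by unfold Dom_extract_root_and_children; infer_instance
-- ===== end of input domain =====

-- B splits buf by recording top-level-space indices and slicing between them, instead of
-- A's character-by-character accumulation of a current segment; same cost, different decomposition.

-- ===== PORT A =====
-- A's loop body: update the bracket balance, then either close the current segment
-- (top-level space) or extend it with the character.
def pvStepA (st : Int × List (List Char) × List Char) (c : Char) :
    Int × List (List Char) × List Char :=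
  let bal := if c = '(' then st.1 + 1 else if c = ')' then st.1 - 1 else st.1
  if bal = 0 ∧ c = ' ' then (bal, st.2.1 ++ [st.2.2], [])
  else (bal, st.2.1, st.2.2 ++ [c])

def extract_root_and_children (buf : String) : String × List String :=
  let st := buf.toList.foldl pvStepA (0, [], [])
  -- segm_in_process[:-1] is dropLast (exact for s[:-1])
  let seq := if st.1 = -1 then st.2.1 ++ [st.2.2.dropLast] else st.2.1 ++ [st.2.2]
  -- seq[0]/seq[1:]; seq is never empty (a final segment is always appended)
  (String.ofList (seq.headD []), (seq.drop 1).map String.ofList)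

-- ===== PORT B =====
-- B's loop body: update the balance and record the index of each top-level space.
def pvStepB (st : Int × List Int) (p : Int × Char) : Int × List Int :=
  let bal := if p.2 = '(' then st.1 + 1 else if p.2 = ')' then st.1 - 1 else st.1
  if bal = 0 ∧ p.2 = ' ' then (bal, st.2 ++ [p.1]) else (bal, st.2)

def extract_root_and_children_alt (buf : String) : String × List String :=
  let cs := buf.toList
  let st := (PySem.List.enumerate cs 0).foldl pvStepB (0, [])
  let bounds : List Int := -1 :: (st.2 ++ [(cs.length : Int)])
  let toks := (List.range (bounds.length - 1)).map (fun j =>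
      PySem.List.slice cs (some (bounds.getD j 0 + 1)) (some (bounds.getD (j + 1) 0)))
  -- toks[-1] = toks[-1][:-1]
  let toks := if st.1 = -1 then toks.dropLast ++ [(toks.getLastD []).dropLast] else toks
  (String.ofList (toks.headD []), (toks.drop 1).map String.ofList)

-- ===== PRECONDITION & SPEC =====
def Spec_extract_root_and_children (buf : String) (out : String × List String) : Prop := out = extract_root_and_children_alt buf
instance (buf : String) (out : String × List String) : Decidable (Spec_extract_root_and_children buf out) := by unfold Spec_extract_root_and_children; infer_instance

-- ===== CLAIM (what is proved, stated in full; the proofs are below) =====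
def Claim_equal_extract_root_and_children : Prop := ∀ (buf : String), Dom_extract_root_and_children buf → Spec_extract_root_and_children buf (extract_root_and_children buf)

-- ===== LEMMAS AND PROOFS =====

/-- The list of adjacent pairs of a list. -/
def pvAdj : List Int → List (Int × Int)
  | a :: b :: r => (a, b) :: pvAdj (b :: r)
  | _ => []

/-- B's comprehension over `range(len(bounds)-1)` with indexing is the map over adjacent pairs. -/
lemma pvAdj_map (g : Int → Int → List Char) :
    ∀ bounds : List Int,
    (List.range (bounds.length - 1)).map
        (fun j => g (bounds.getD j 0) (bounds.getD (j + 1) 0)) =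
      (pvAdj bounds).map (fun p => g p.1 p.2)
  | [] => by simp [pvAdj]
  | [a] => by simp [pvAdj]
  | a :: b :: r => by
    have ih := pvAdj_map g (b :: r)
    simp only [pvAdj, List.length_cons, Nat.add_sub_cancel, List.range_succ_eq_map,
      List.map_cons, List.map_map] at *
    refine congrArg₂ _ rfl ?_
    simpa [Function.comp] using ih

lemma pvAdj_append_last (X : List Int) (m : Int) (hX : X ≠ []) :
    pvAdj (X ++ [m]) = pvAdj X ++ [(X.getLastD 0, m)] := by
  induction X with
  | nil => simp at hX
  | cons a Y ih =>
    cases Y with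
    | nil => simp [pvAdj]
    | cons b r =>
      simp only [List.cons_append, pvAdj]
      rw [List.cons_append] at ih
      simp [ih (by simp)]

lemma pvAdj_mem : ∀ {X : List Int} {p : Int × Int}, p ∈ pvAdj X → p.1 ∈ X ∧ p.2 ∈ X.tail
  | a :: b :: r, p, h => by
    rcases List.mem_cons.mp h with h | h
    · subst h; simp
    · have := pvAdj_mem h
      exact ⟨List.mem_cons_of_mem _ this.1, by simpa using List.mem_cons_of_mem b this.2⟩

/-- A slice below the length of the prefix ignores an appended character. -/
lemma slice_prefix (cs : List Char) (c : Char) (a b : Int)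
    (ha : 0 ≤ a) (hb : 0 ≤ b) (hble : b ≤ (cs.length : Int)) :
    PySem.List.slice (cs ++ [c]) (some a) (some b) = PySem.List.slice cs (some a) (some b) := by
  rw [PySem.List.slice_toNat _ ha hb, PySem.List.slice_toNat _ ha hb]
  by_cases hab : a.toNat ≤ cs.length
  · rw [List.drop_append_of_le_length hab, List.take_append_of_le_length (by
      simp only [List.length_drop]; omega)]
  · have h1 : cs.drop a.toNat = [] := List.drop_eq_nil_of_le (by omega)
    have h2 : b.toNat - a.toNat = 0 := by omega
    simp [h2]

/-- A slice reaching the length is a drop. -/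
lemma slice_to_len (cs : List Char) (a : Int) (ha : 0 ≤ a) :
    PySem.List.slice cs (some a) (some (cs.length : Int)) = cs.drop a.toNat := by
  rw [PySem.List.slice_toNat _ ha (by positivity)]
  exact List.take_of_length_le (by simp)

/-- Joint loop invariant: the two folds agree on the balance, every recorded cut index is a
valid position, and slicing between consecutive boundaries reproduces A's segments. -/
lemma pvMainInv (cs : List Char) :
    (cs.foldl pvStepA (0, [], [])).1 = ((PySem.List.enumerate cs 0).foldl pvStepB (0, [])).1 ∧
    (∀ x ∈ ((PySem.List.enumerate cs 0).foldl pvStepB (0, [])).2, 0 ≤ x ∧ x < (cs.length : Int)) ∧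
    (pvAdj (-1 :: (((PySem.List.enumerate cs 0).foldl pvStepB (0, [])).2 ++ [(cs.length : Int)]))).map
        (fun p => PySem.List.slice cs (some (p.1 + 1)) (some p.2)) =
      (cs.foldl pvStepA (0, [], [])).2.1 ++ [(cs.foldl pvStepA (0, [], [])).2.2] := by
  induction cs using List.reverseRecOn with
  | nil => refine ⟨rfl, by simp [PySem.List.enumerate], by decide⟩
  | append_singleton cs c ih =>
    obtain ⟨ih1, ih2, ih3⟩ := ih
    set sa := cs.foldl pvStepA (0, [], []) with hsa
    set sb := (PySem.List.enumerate cs 0).foldl pvStepB (0, []) with hsb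
    set n : Int := (cs.length : Int) with hn
    have hA : (cs ++ [c]).foldl pvStepA (0, [], []) = pvStepA sa c := by
      rw [List.foldl_append]; rfl
    have hE : PySem.List.enumerate (cs ++ [c]) 0 =
        PySem.List.enumerate cs 0 ++ [(n, c)] := by
      rw [PySem.List.enumerate_append]
      simp [PySem.List.enumerate_cons, PySem.List.enumerate_nil, hn]
    have hB : ((PySem.List.enumerate (cs ++ [c]) 0).foldl pvStepB (0, [])) =
        pvStepB sb (n, c) := by rw [hE, List.foldl_append]; rfl
    have hlen : ((cs ++ [c]).length : Int) = n + 1 := by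
      simp [hn]
    set nb : Int := if c = '(' then sa.1 + 1 else if c = ')' then sa.1 - 1 else sa.1 with hnb
    have hstepA : pvStepA sa c =
        (if nb = 0 ∧ c = ' ' then (nb, sa.2.1 ++ [sa.2.2], [])
         else (nb, sa.2.1, sa.2.2 ++ [c])) := rfl
    have hstepB : pvStepB sb (n, c) =
        (if nb = 0 ∧ c = ' ' then (nb, sb.2 ++ [n]) else (nb, sb.2)) := by
      simp only [pvStepB, ← ih1, hnb]
    rw [hA, hB, hstepA, hstepB, hlen]
    -- slices with both bounds at most n ignore the appended character
    have hsl : ∀ X : List Int, (∀ x ∈ X, -1 ≤ x) → (∀ x ∈ X.tail, 0 ≤ x ∧ x ≤ n) →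
        (pvAdj X).map (fun p => PySem.List.slice (cs ++ [c]) (some (p.1 + 1)) (some p.2)) =
        (pvAdj X).map (fun p => PySem.List.slice cs (some (p.1 + 1)) (some p.2)) := by
      intro X h1 h2
      refine List.map_congr_left (fun p hp => ?_)
      obtain ⟨hp1, hp2⟩ := pvAdj_mem hp
      exact slice_prefix cs c _ _ (by have := h1 _ hp1; omega) (h2 _ hp2).1 (h2 _ hp2).2
    have hn0 : 0 ≤ n := by positivity
    by_cases hc : nb = 0 ∧ c = ' '
    · simp only [if_pos hc]
      refine ⟨trivial, ?_, ?_⟩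
      · intro x hx
        rcases List.mem_append.mp hx with hx | hx
        · have := ih2 x hx; omega
        · simp at hx; omega
      · have hX : (-1 : Int) :: ((sb.2 ++ [n]) ++ [n + 1]) =
            ((-1 : Int) :: (sb.2 ++ [n])) ++ [n + 1] := by simp
        rw [hX, pvAdj_append_last _ _ (by simp), List.map_append]
        have hlast : (((-1 : Int) :: (sb.2 ++ [n])).getLastD 0) = n := by
          rw [show (-1 : Int) :: (sb.2 ++ [n]) = ((-1 :: sb.2) ++ [n]) by simp,
            List.getLastD_concat]
        rw [hlast]
        have hnew : PySem.List.slice (cs ++ [c]) (some (n + 1)) (some (n + 1)) = [] := by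
          have := slice_to_len (cs ++ [c]) (n + 1) (by omega)
          rw [hlen] at this
          rw [this]
          apply List.drop_eq_nil_of_le
          simp [hn]
        rw [hsl _ ?_ ?_]
        · simp only [List.map_cons, List.map_nil, hnew, ih3]
        · intro x hx
          rcases List.mem_cons.mp hx with hx | hx
          · omega
          · rcases List.mem_append.mp hx with hx | hx
            · have := ih2 x hx; omega
            · simp at hx; omega
        · intro x hx
          simp only [List.tail_cons] at hx
          rcases List.mem_append.mp hx with hx | hx
          · have := ih2 x hx; exact ⟨this.1, by omega⟩
          · simp at hx; omega
    · simp only [if_neg hc]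
      refine ⟨trivial, ?_, ?_⟩
      · intro x hx; have := ih2 x hx; omega
      · have hX : ∀ m : Int, (-1 : Int) :: (sb.2 ++ [m]) = ((-1 : Int) :: sb.2) ++ [m] := by
          simp
        set L : Int := (((-1 : Int) :: sb.2).getLastD 0) with hL
        have hLmem : L ∈ (-1 : Int) :: sb.2 := by
          rw [hL, List.getLastD_cons]
          exact List.getLastD_mem_cons ..
        have hLb : -1 ≤ L ∧ L < n := by
          rcases List.mem_cons.mp hLmem with h | h
          · constructor <;> omega
          · have := ih2 _ h; constructor <;> omega
        rw [hX] at ih3 ⊢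
        rw [pvAdj_append_last _ _ (by simp), List.map_append] at ih3 ⊢
        obtain ⟨h1, h2⟩ := List.append_inj' ih3 (by simp)
        simp only [List.map_cons, List.map_nil, List.cons.injEq, and_true] at h2
        have h2' : (cs.drop (L + 1).toNat) = sa.2.2 := by
          rw [← h2, ← hL, slice_to_len cs _ (by omega)]
        have hnewlast : PySem.List.slice (cs ++ [c]) (some (L + 1)) (some (n + 1)) =
            sa.2.2 ++ [c] := by
          have := slice_to_len (cs ++ [c]) (L + 1) (by omega)
          rw [hlen] at this
          rw [this, List.drop_append_of_le_length (by simp [hn] at *; omega), h2']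
        rw [hsl _ ?_ ?_, h1]
        · have hg : ((-1 : Int) :: sb.2).getLast?.getD 0 = L := by
            rw [hL, List.getLastD_eq_getLast?]
          simp [hg, hnewlast]
        · intro x hx
          rcases List.mem_cons.mp hx with hx | hx
          · omega
          · have := ih2 x hx; omega
        · intro x hx
          simp only [List.tail_cons] at hx
          have := ih2 x hx; exact ⟨this.1, by omega⟩

-- ===== VERDICT (by name: the statement is the Claim_ definition above) =====
theorem extract_root_and_children_spec : Claim_equal_extract_root_and_children := by
  intro buf _
  simp only [Spec_extract_root_and_children, extract_root_and_children,
    extract_root_and_children_alt]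
  obtain ⟨h1, h2, h3⟩ := pvMainInv buf.toList
  rw [pvAdj_map (fun a b => PySem.List.slice buf.toList (some (a + 1)) (some b))]
  rw [h3, ← h1]
  by_cases hbal : (buf.toList.foldl pvStepA (0, [], [])).1 = -1
  · simp only [if_pos hbal, List.dropLast_concat, List.getLastD_concat]
  · simp only [if_neg hbal]
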